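-- pv_equiv track=rewrite | github.com/kolzchut/srm-etl | operators/derive/helpers.py | update_taxonomy_with_parents
-- ===== SOURCE A (Python) =====
-- def update_taxonomy_with_parents(v):
--     ids = v or []
--     ret = set()
--     for id in ids:
--         parts = id.split(':')
--         for i in range(2, len(parts) + 1):
--             ret.add(':'.join(parts[:i]))
--     return sorted(ret)
-- ===== SOURCE B (Python) =====
-- def update_taxonomy_with_parents(v):
--     ret = set()
--     for id in (v or []):
--         parts = id.split(':')
--         acc = parts[0]
--         for p in parts[1:]:
--             acc = acc + ':' + p
--             ret.add(acc)
--     return sorted(ret)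
-- ===== Notes on version B (the rewrite author's own statement) =====
-- stated objective: simpler
-- what changed: Instead of re-building every prefix from scratch with ':'.join(parts[:i]) over an index range, B extends one running accumulator string across parts[1:], adding it to the set after each extension (one linear pass per id, no slicing or re-joining).
import Mathlib
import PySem

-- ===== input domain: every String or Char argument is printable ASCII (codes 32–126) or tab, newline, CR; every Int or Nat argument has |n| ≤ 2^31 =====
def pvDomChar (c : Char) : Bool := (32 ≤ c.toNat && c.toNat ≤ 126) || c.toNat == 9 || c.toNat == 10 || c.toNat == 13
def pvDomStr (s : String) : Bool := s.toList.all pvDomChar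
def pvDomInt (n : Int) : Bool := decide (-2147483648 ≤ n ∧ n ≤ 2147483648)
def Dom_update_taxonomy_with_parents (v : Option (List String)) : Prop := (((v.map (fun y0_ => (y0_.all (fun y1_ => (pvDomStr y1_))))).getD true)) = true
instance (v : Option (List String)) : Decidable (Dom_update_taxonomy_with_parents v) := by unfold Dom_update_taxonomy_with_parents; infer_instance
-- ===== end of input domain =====

-- B replaces A's indexed rejoin of each prefix (':'.join(parts[:i]) for i in range(2, len+1))
-- by a single pass extending a running accumulator string; objective: simpler.

-- ===== PORT A =====
def update_taxonomy_with_parents (v : Option (List String)) : List String :=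
  let ids := v.getD []
  let ret := ids.foldl (fun ret id =>
      let parts := (PySem.Str.split? id ":").getD []
      (PySem.List.pyRange 2 ((parts.length : Int) + 1)).foldl
        (fun ret i => PySem.Set.add ret (PySem.Str.join ":" (PySem.List.slice parts none (some i)))) ret)
    PySem.Set.empty
  PySem.List.sorted ret (fun x => x)

-- ===== PORT B =====
def update_taxonomy_with_parents_alt (v : Option (List String)) : List String :=
  let ret := (v.getD []).foldl (fun ret id =>
      match (PySem.Str.split? id ":").getD [] with
      | [] => ret  -- unreachable: str.split(':') always yields at least one piece
      | p0 :: rest =>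
        (rest.foldl (fun (st : String × PySem.Set String) p =>
            let acc := st.1 ++ ":" ++ p
            (acc, PySem.Set.add st.2 acc)) (p0, ret)).2)
    PySem.Set.empty
  PySem.List.sorted ret (fun x => x)

-- ===== PRECONDITION & SPEC =====
def Spec_update_taxonomy_with_parents (v : Option (List String)) (out : List String) : Prop := out = update_taxonomy_with_parents_alt v
instance (v : Option (List String)) (out : List String) : Decidable (Spec_update_taxonomy_with_parents v out) := by unfold Spec_update_taxonomy_with_parents; infer_instance

-- ===== CLAIM (what is proved, stated in full; the proofs are below) =====
def Claim_equal_update_taxonomy_with_parents : Prop := ∀ (v : Option (List String)), Dom_update_taxonomy_with_parents v → Spec_update_taxonomy_with_parents v (update_taxonomy_with_parents v)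

-- ===== LEMMAS AND PROOFS =====

-- the common recursive shape both inner loops compute
def pvAddAll : String → List String → PySem.Set String → PySem.Set String
  | _, [], s => s
  | acc, p :: ps, s => pvAddAll (acc ++ ":" ++ p) ps (PySem.Set.add s (acc ++ ":" ++ p))

theorem pv_join_pair (a b : String) : PySem.Str.join ":" [a, b] = a ++ ":" ++ b := by
  apply String.toList_inj.mp
  simp [PySem.Str.toList_join, PySem.Chars.join_cons_cons, PySem.Chars.join_singleton]

theorem pv_join_merge (a b : String) (l : List String) :
    PySem.Str.join ":" (a :: b :: l) = PySem.Str.join ":" ((a ++ ":" ++ b) :: l) := by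
  apply String.toList_inj.mp
  cases l with
  | nil => simp [PySem.Str.toList_join, PySem.Chars.join_cons_cons]
  | cons c cs => simp [PySem.Str.toList_join, PySem.Chars.join_cons_cons]

theorem pv_keyA : ∀ (rest : List String) (p0 : String) (s : PySem.Set String),
    (List.range rest.length).foldl
      (fun s k => PySem.Set.add s (PySem.Str.join ":" ((p0 :: rest).take (2 + k)))) s
    = pvAddAll p0 rest s := by
  intro rest
  induction rest with
  | nil => intro p0 s; rfl
  | cons r0 rest' ih =>
    intro p0 s
    rw [List.length_cons, List.range_succ_eq_map]
    simp only [List.foldl_cons, List.foldl_map]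
    have h0 : PySem.Str.join ":" ((p0 :: r0 :: rest').take (2 + 0)) = p0 ++ ":" ++ r0 := by
      simpa using pv_join_pair p0 r0
    rw [h0]
    have hfun : ∀ (t : PySem.Set String), ∀ k ∈ List.range rest'.length,
        PySem.Set.add t (PySem.Str.join ":" ((p0 :: r0 :: rest').take (2 + (k + 1))))
        = PySem.Set.add t (PySem.Str.join ":" (((p0 ++ ":" ++ r0) :: rest').take (2 + k))) := by
      intro t k _
      have ht : (p0 :: r0 :: rest').take (2 + (k + 1)) = p0 :: r0 :: rest'.take (k + 1) := by
        simp [Nat.add_comm]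
      have ht2 : ((p0 ++ ":" ++ r0) :: rest').take (2 + k) = (p0 ++ ":" ++ r0) :: rest'.take (k + 1) := by
        simp [Nat.add_comm]
      rw [ht, ht2, pv_join_merge]
    rw [PySem.List.foldl_congr_mem _ _ _ _ hfun]
    exact ih (p0 ++ ":" ++ r0) (PySem.Set.add s (p0 ++ ":" ++ r0))

theorem pv_keyB : ∀ (rest : List String) (acc : String) (s : PySem.Set String),
    (rest.foldl (fun (st : String × PySem.Set String) p =>
        let a := st.1 ++ ":" ++ p
        (a, PySem.Set.add st.2 a)) (acc, s)).2 = pvAddAll acc rest s := by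
  intro rest
  induction rest with
  | nil => intro acc s; rfl
  | cons p ps ih => intro acc s; simp only [List.foldl_cons, pvAddAll]; exact ih _ _

theorem pv_inner_eq (id : String) (s : PySem.Set String) :
    (PySem.List.pyRange 2 ((((PySem.Str.split? id ":").getD []).length : Int) + 1)).foldl
      (fun ret i => PySem.Set.add ret (PySem.Str.join ":"
        (PySem.List.slice ((PySem.Str.split? id ":").getD []) none (some i)))) s
    = (match (PySem.Str.split? id ":").getD [] with
       | [] => s
       | p0 :: rest =>
         (rest.foldl (fun (st : String × PySem.Set String) p =>
            let acc := st.1 ++ ":" ++ p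
            (acc, PySem.Set.add st.2 acc)) (p0, s)).2) := by
  generalize (PySem.Str.split? id ":").getD [] = parts
  cases parts with
  | nil => norm_num [PySem.List.pyRange_one]
  | cons p0 rest =>
    show _ = (rest.foldl (fun (st : String × PySem.Set String) p =>
        let acc := st.1 ++ ":" ++ p
        (acc, PySem.Set.add st.2 acc)) (p0, s)).2
    rw [pv_keyB]
    have hc : ∀ (t : PySem.Set String), ∀ i ∈ PySem.List.pyRange 2 (((p0 :: rest).length : Int) + 1),
        PySem.Set.add t (PySem.Str.join ":" (PySem.List.slice (p0 :: rest) none (some i)))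
        = PySem.Set.add t (PySem.Str.join ":" ((p0 :: rest).take i.toNat)) := by
      intro t i hi
      have h2 : (2 : Int) ≤ i := (PySem.List.mem_pyRange_one.mp hi).1
      have hs := PySem.List.slice_to (p0 :: rest) (b := i) (by omega)
      rw [hs]
    rw [PySem.List.foldl_congr_mem _ _ _ _ hc]
    have hlen : ((((p0 :: rest).length : Int) + 1) - 2).toNat = rest.length := by
      simp
      omega
    rw [PySem.List.pyRange_one, hlen, List.foldl_map]
    have hc2 : ∀ (t : PySem.Set String), ∀ k ∈ List.range rest.length,
        PySem.Set.add t (PySem.Str.join ":" ((p0 :: rest).take ((2 : Int) + (k : Int)).toNat))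
        = PySem.Set.add t (PySem.Str.join ":" ((p0 :: rest).take (2 + k))) := by
      intro t k _
      have hkn : ((2 : Int) + (k : Int)).toNat = 2 + k := by omega
      rw [hkn]
    rw [PySem.List.foldl_congr_mem _ _ _ _ hc2]
    exact pv_keyA rest p0 s

-- ===== VERDICT (by name: the statement is the Claim_ definition above) =====
theorem update_taxonomy_with_parents_spec : Claim_equal_update_taxonomy_with_parents := by
  intro v _
  unfold Spec_update_taxonomy_with_parents update_taxonomy_with_parents update_taxonomy_with_parents_alt
  simp only []
  congr 1
  refine PySem.List.foldl_congr_mem _ _ _ _ ?_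
  intro s id _
  exact pv_inner_eq id s
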